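-- pv_equiv track=rewrite | github.com/kungminno/programmers | algorithm/algorithm_67.py | solution
-- ===== SOURCE A (Python) =====
-- def solution(s, skip, index):
--     answer = ''
--
--     for word in s:
--         trans = ord(word)
--         i = 0
--         while i < index:
--             i+=1
--             trans += 1
--             if trans > 122:
--                 trans = 97
--             if chr(trans) in skip:
--                 i -= 1
--         answer += chr(trans)
--     return answer
-- ===== SOURCE B (Python) =====
-- def solution(s, skip, index):
--     sk = set(skip)
--     allowed = [q for q in range(97, 123) if chr(q) not in sk]
--     out = []
--     for c in s:
--         p = ord(c)
--         if index <= 0: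
--             out.append(c)
--             continue
--         head = [q for q in range(p + 1, 123) if chr(q) not in sk]
--         if index <= len(head):
--             out.append(chr(head[index - 1]))
--         else:
--             out.append(chr(allowed[(index - len(head) - 1) % len(allowed)]))
--     return ''.join(out)
-- ===== Notes on version B (the rewrite author's own statement) =====
-- stated objective: faster
-- what changed: A simulates the shift character by character, one position per while-iteration with the counter pushed back on skipped letters (index iterations per character); B computes each output character directly: it builds the filtered list of non-skip positions once and reads the answer off by position counting and modular indexing into the allowed-letter cycle, so the cost per character is bounded by the alphabet size instead of index.
import Mathlib
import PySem

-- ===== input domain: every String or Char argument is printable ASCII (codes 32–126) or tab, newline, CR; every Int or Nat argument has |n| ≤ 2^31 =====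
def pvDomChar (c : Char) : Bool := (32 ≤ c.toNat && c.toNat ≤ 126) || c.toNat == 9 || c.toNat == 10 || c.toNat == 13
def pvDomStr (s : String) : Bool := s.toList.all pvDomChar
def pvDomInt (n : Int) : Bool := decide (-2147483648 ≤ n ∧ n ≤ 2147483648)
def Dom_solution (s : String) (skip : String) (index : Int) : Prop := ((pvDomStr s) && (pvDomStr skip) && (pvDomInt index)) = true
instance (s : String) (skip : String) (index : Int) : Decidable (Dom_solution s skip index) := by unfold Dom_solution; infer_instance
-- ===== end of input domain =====

-- B replaces A's per-character step-by-step Caesar walk (index iterations per character, with a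
-- counter that is pushed back on skipped letters) by a direct O(1)-per-step-count computation:
-- the surviving positions are listed once and the answer is read off by modular indexing.

-- ===== PORT A =====

-- chr(t): exact for 0 ≤ t ≤ 0x10FFFF (every value reached here is ≤ 126)
def pyChr (t : Int) : Char := Char.ofNat t.toNat

-- the 'while i < index' loop; fuel only makes it total (under Pre_solution it is never exhausted, proved below)
def solGo (skip : String) (index : Int) : Nat → Int → Int → Int
  | 0, tr, _ => tr
  | fuel+1, tr, i =>
    if i < index then
      let i1 := i + 1
      let t1 := tr + 1
      let t2 := if t1 > 122 then 97 else t1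
      -- 'chr(trans) in skip': single-character substring membership = character membership (exact)
      let i2 := if skip.toList.contains (pyChr t2) then i1 - 1 else i1
      solGo skip index fuel t2 i2
    else tr

def solution (s : String) (skip : String) (index : Int) : String :=
  String.ofList (s.toList.foldl
    (fun acc word => acc ++ [pyChr (solGo skip index (150 * index.toNat + 200) ((word.toNat : Int)) 0)])
    [])

-- ===== PORT B =====

-- one character of B: positions p+1..122 still ahead ('head'), then the cycle of allowed letters
def altChar (sk : PySem.Set Char) (allowed : List Int) (index : Int) (c : Char) : Char :=
  if index ≤ 0 then c
  else
    let p : Int := (c.toNat : Int)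
    let head := (PySem.List.pyRange (p + 1) 123 1).filter (fun q => !(PySem.Set.contains sk (pyChr q)))
    if index ≤ (head.length : Int) then
      pyChr (PySem.List.pyGetD head (index - 1) 0)
    else
      pyChr (PySem.List.pyGetD allowed
        (PySem.Int.mod (index - (head.length : Int) - 1) ((allowed.length : Int))) 0)

def solution_alt (s : String) (skip : String) (index : Int) : String :=
  let sk := PySem.Set.ofList skip.toList
  let allowed := (PySem.List.pyRange 97 123 1).filter (fun q => !(PySem.Set.contains sk (pyChr q)))
  String.ofList (s.toList.map (altChar sk allowed index))

-- ===== PRECONDITION & SPEC =====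

-- helpers Pre_solution is phrased with (shared with the proofs; not used by either port)
def okq (skip : String) (q : Int) : Bool := !(skip.toList.contains (pyChr q))
def headL (skip : String) (p : Int) : List Int := (PySem.List.pyRange (p + 1) 123 1).filter (okq skip)
def allowedL (skip : String) : List Int := headL skip 96

-- Pre_ excludes exactly the inputs on which A's while-loop never terminates (index > 0, every
-- lowercase letter in skip, and some character of s has fewer than index non-skip positions
-- strictly above it and below 'z'+1); A returns on every input satisfying Pre_.
def Pre_solution (s : String) (skip : String) (index : Int) : Prop :=
  index ≤ 0 ∨ 1 ≤ (allowedL skip).length ∨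
    ∀ c ∈ s.toList, index ≤ ((headL skip ((c.toNat : Int))).length : Int)
instance (s : String) (skip : String) (index : Int) : Decidable (Pre_solution s skip index) := by
  unfold Pre_solution; infer_instance

def pvWitness_solution : String × String × Int := ("ab", "c", 3)

def Spec_solution (s : String) (skip : String) (index : Int) (out : String) : Prop := out = solution_alt s skip index
instance (s : String) (skip : String) (index : Int) (out : String) : Decidable (Spec_solution s skip index out) := by unfold Spec_solution; infer_instance

-- ===== CLAIM (what is proved, stated in full; the proofs are below) =====
def Claim_equal_solution : Prop := ∀ (s : String) (skip : String) (index : Int), Dom_solution s skip index → Pre_solution s skip index → Spec_solution s skip index (solution s skip index)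

-- ===== LEMMAS AND PROOFS =====

-- A's loop re-indexed by the remaining count r = index - i
def loopRem (skip : String) : Nat → Int → Int → Int
  | 0, p, _ => p
  | fuel+1, p, r =>
    if 0 < r then
      let q := if p + 1 > 122 then 97 else p + 1
      loopRem skip fuel q (if okq skip q then r - 1 else r)
    else p

-- number of raw steps from p to the next surviving position (two half-cycles always suffice)
def distP (skip : String) (p : Int) : Nat :=
  1 + ((PySem.List.pyRange (p + 1) 123 1 ++ PySem.List.pyRange 97 123 1).takeWhile
        (fun q => !(okq skip q))).length

-- B's per-character value on the integer side
def Bval (skip : String) (p r : Int) : Int :=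
  if r ≤ ((headL skip p).length : Int) then
    PySem.List.pyGetD (headL skip p) (r - 1) 0
  else
    PySem.List.pyGetD (allowedL skip)
      (PySem.Int.mod (r - ((headL skip p).length : Int) - 1) (((allowedL skip).length : Int))) 0

theorem loopRem_zero (skip : String) (f : Nat) (p r : Int) (h : r ≤ 0) :
    loopRem skip f p r = p := by
  cases f with
  | zero => rfl
  | succ n => simp [loopRem, show ¬(0 < r) from by omega]

theorem contains_ofList_char (l : List Char) (x : Char) :
    PySem.Set.contains (PySem.Set.ofList l) x = l.contains x := by
  by_cases h : x ∈ l <;> simp [PySem.Set.mem_ofList, h]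

theorem solGo_eq_loopRem (skip : String) (index : Int) (f : Nat) :
    ∀ t i, solGo skip index f t i = loopRem skip f t (index - i) := by
  induction f with
  | zero => intro t i; rfl
  | succ f ih =>
    intro t i
    by_cases h : i < index
    · simp only [solGo, loopRem, if_pos h, if_pos (show (0:Int) < index - i from by omega)]
      rw [ih]
      have hok : okq skip (if t + 1 > 122 then 97 else t + 1)
          = !(skip.toList.contains (pyChr (if t + 1 > 122 then 97 else t + 1))) := rfl
      rw [hok]
      cases hc : skip.toList.contains (pyChr (if t + 1 > 122 then 97 else t + 1)) <;>
        simp only [hc, Bool.not_false, Bool.not_true, Bool.false_eq_true, Bool.true_eq_false,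
          ite_true, ite_false, if_true, if_false] <;>
        congr 1 <;> omega
    · rw [loopRem_zero skip (f + 1) t (index - i) (by omega)]
      simp [solGo, h]

theorem dist_le (skip : String) (p : Int) (h9 : 9 ≤ p) : distP skip p ≤ 140 := by
  unfold distP
  have h1 := (List.takeWhile_prefix (p := fun q => !(okq skip q))
    (l := PySem.List.pyRange (p + 1) 123 1 ++ PySem.List.pyRange 97 123 1)).length_le
  simp [PySem.List.length_pyRange_one] at h1
  omega

theorem headL_cons (skip : String) (p : Int) (hp : p ≤ 121) :
    headL skip p = if okq skip (p + 1) then (p + 1) :: headL skip (p + 1) else headL skip (p + 1) := by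
  unfold headL
  rw [PySem.List.pyRange_one_cons (by omega : p + 1 < (123:Int))]
  rw [List.filter_cons]

theorem allowedL_eq (skip : String) :
    allowedL skip = if okq skip 97 then 97 :: headL skip 97 else headL skip 97 := by
  have h := headL_cons skip 96 (by omega)
  norm_num at h
  unfold allowedL
  exact h

theorem headL_nil (skip : String) (p : Int) (hp : 122 ≤ p) : headL skip p = [] := by
  unfold headL
  rw [PySem.List.pyRange_one_eq_nil (by omega : (123:Int) ≤ p + 1)]
  rfl

theorem distP_one_ok (skip : String) (p : Int) (hp : p ≤ 121) (h : okq skip (p + 1) = true) :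
    distP skip p = 1 := by
  unfold distP
  rw [PySem.List.pyRange_one_cons (by omega : p + 1 < (123:Int))]
  simp [h]

theorem distP_succ_not (skip : String) (p : Int) (hp : p ≤ 121) (h : okq skip (p + 1) = false) :
    distP skip p = distP skip (p + 1) + 1 := by
  unfold distP
  rw [PySem.List.pyRange_one_cons (by omega : p + 1 < (123:Int))]
  simp [h]
  omega

theorem distP_wrap_ok (skip : String) (p : Int) (hp : 122 ≤ p) (h : okq skip 97 = true) :
    distP skip p = 1 := by
  unfold distP
  rw [PySem.List.pyRange_one_eq_nil (by omega : (123:Int) ≤ p + 1)]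
  rw [PySem.List.pyRange_one_cons (by omega : (97:Int) < 123)]
  simp [h]

theorem distP_wrap_not (skip : String) (p : Int) (hp : 122 ≤ p) (h : okq skip 97 = false)
    (hne : headL skip 97 ≠ []) : distP skip p = distP skip 97 + 1 := by
  rcases List.exists_mem_of_ne_nil _ hne with ⟨x, hx⟩
  rw [headL, List.mem_filter] at hx
  have hcond : ¬((List.takeWhile (fun q => !okq skip q) (PySem.List.pyRange (97 + 1) 123 1)).length
      = (PySem.List.pyRange (97 + 1) 123 1).length) := by
    intro heq
    have hpre := List.takeWhile_prefix (p := fun q => !okq skip q)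
      (l := PySem.List.pyRange (97 + 1) 123 1)
    have heqq := hpre.eq_of_length heq
    have hmem : x ∈ List.takeWhile (fun q => !okq skip q) (PySem.List.pyRange (97 + 1) 123 1) := by
      rw [heqq]; exact hx.1
    have hxx : (!okq skip x) = true := List.mem_takeWhile_imp (p := fun q => !okq skip q) hmem
    rw [hx.2] at hxx
    simp at hxx
  unfold distP
  rw [PySem.List.pyRange_one_eq_nil (by omega : (123:Int) ≤ p + 1), List.nil_append]
  rw [show PySem.List.pyRange 97 123 1 = 97 :: PySem.List.pyRange (97 + 1) 123 1 from
        PySem.List.pyRange_one_cons (by omega)]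
  simp only [List.takeWhile_cons, List.takeWhile_append, h, Bool.not_false, if_true,
    List.length_cons, if_neg hcond]
  omega

theorem main_lemma (skip : String) : ∀ (f : Nat) (p r : Int), 9 ≤ p → p ≤ 126 → 1 ≤ r →
    (r ≤ ((headL skip p).length : Int) ∨ 1 ≤ (allowedL skip).length) →
    150 * (r.toNat - 1) + distP skip p ≤ f →
    loopRem skip f p r = Bval skip p r := by
  intro f
  induction f with
  | zero =>
    intro p r _ _ _ _ hf
    exfalso; unfold distP at hf; omega
  | succ f ih =>
    intro p r h9 h126 hr hside hf
    rw [show loopRem skip (f+1) p r =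
      loopRem skip f (if p + 1 > 122 then 97 else p + 1)
        (if okq skip (if p + 1 > 122 then 97 else p + 1) then r - 1 else r) from by
        simp [loopRem, show (0:Int) < r from by omega]]
    by_cases hp : p ≤ 121
    · -- no wrap: next position is p + 1
      rw [if_neg (show ¬(p + 1 > (122:Int)) from by omega)]
      have hcons := headL_cons skip p hp
      by_cases hok : okq skip (p + 1) = true
      · rw [if_pos hok]
        rw [hcons, if_pos hok] at hside
        by_cases hr1 : r = 1
        · subst hr1
          rw [loopRem_zero skip f (p + 1) (1 - 1) (by omega)]
          unfold Bval
          rw [hcons, if_pos hok]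
          rw [if_pos (show (1:Int) ≤ (((p + 1) :: headL skip (p + 1)).length : Int) from by
                exact_mod_cast Nat.succ_le_succ (Nat.zero_le _))]
          simp [show (1:Int) - 1 = 0 from by ring, PySem.List.pyGetD_zero_cons]
        · -- r ≥ 2
          have hd1 : distP skip p = 1 := distP_one_ok skip p hp hok
          have hdle : distP skip (p + 1) ≤ 140 := dist_le skip (p + 1) (by omega)
          have hside' : r - 1 ≤ ((headL skip (p + 1)).length : Int) ∨ 1 ≤ (allowedL skip).length := by
            rcases hside with hl | hr2
            · left; simp at hl; omega
            · right; exact hr2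
          have hfuel : 150 * ((r - 1).toNat - 1) + distP skip (p + 1) ≤ f := by omega
          rw [ih (p + 1) (r - 1) (by omega) (by omega) (by omega) hside' hfuel]
          unfold Bval
          rw [hcons, if_pos hok]
          simp only [List.length_cons]
          by_cases hb : r - 1 ≤ ((headL skip (p + 1)).length : Int)
          · rw [if_pos (show r - 1 ≤ ((headL skip (p + 1)).length : Int) from hb),
                if_pos (show r ≤ (((headL skip (p + 1)).length + 1 : Nat) : Int) from by
                  push_cast; omega)]
            rw [PySem.List.pyGetD_of_nonneg _ _ (by omega : (0:Int) ≤ r - 1 - 1),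
                PySem.List.pyGetD_of_nonneg _ _ (by omega : (0:Int) ≤ r - 1)]
            rw [show (r - 1).toNat = (r - 1 - 1).toNat + 1 from by omega]
            simp [List.getD_cons_succ]
          · rw [if_neg (show ¬(r - 1 ≤ ((headL skip (p + 1)).length : Int)) from hb),
                if_neg (show ¬(r ≤ (((headL skip (p + 1)).length + 1 : Nat) : Int)) from by
                  push_cast; omega)]
            congr 2
            push_cast
            ring
      · -- position p + 1 is skipped
        simp only [Bool.not_eq_true] at hok
        rw [if_neg (by simp [hok])]
        have hcons' : headL skip p = headL skip (p + 1) := by rw [hcons, if_neg (by simp [hok])]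
        have hdist : distP skip p = distP skip (p + 1) + 1 := distP_succ_not skip p hp hok
        have hside' : r ≤ ((headL skip (p + 1)).length : Int) ∨ 1 ≤ (allowedL skip).length := by
          rwa [hcons'] at hside
        have hfuel : 150 * (r.toNat - 1) + distP skip (p + 1) ≤ f := by omega
        rw [ih (p + 1) r (by omega) (by omega) hr hside' hfuel]
        unfold Bval
        rw [hcons']
    · -- wrap: next position is 97
      have hp2 : 122 ≤ p := by omega
      rw [if_pos (show p + 1 > (122:Int) from by omega)]
      have hnil : headL skip p = [] := headL_nil skip p hp2
      have hL : 1 ≤ (allowedL skip).length := by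
        rcases hside with hl | hr2
        · exfalso; rw [hnil] at hl; simp at hl; omega
        · exact hr2
      have hAeq := allowedL_eq skip
      have hBp : Bval skip p r = PySem.List.pyGetD (allowedL skip)
          (PySem.Int.mod (r - 1) (((allowedL skip).length : Int))) 0 := by
        unfold Bval
        rw [hnil]
        split_ifs with h1
        · exfalso; simp at h1; omega
        · norm_num
      rw [hBp]
      by_cases hok : okq skip 97 = true
      · rw [if_pos hok]
        have hA : allowedL skip = 97 :: headL skip 97 := by rw [hAeq, if_pos hok]
        by_cases hr1 : r = 1
        · subst hr1
          rw [loopRem_zero skip f 97 (1 - 1) (by omega)]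
          rw [hA]
          rw [show (1:Int) - 1 = 0 from by ring]
          rw [PySem.Int.mod_eq_emod_of_pos (by simp)]
          simp [PySem.List.pyGetD_zero_cons]
        · have hd1 : distP skip p = 1 := distP_wrap_ok skip p hp2 hok
          have hdle : distP skip 97 ≤ 140 := dist_le skip 97 (by omega)
          have hfuel : 150 * ((r - 1).toNat - 1) + distP skip 97 ≤ f := by omega
          rw [ih 97 (r - 1) (by omega) (by omega) (by omega) (Or.inr hL) hfuel]
          unfold Bval
          have hLval : ((allowedL skip).length : Int) = ((headL skip 97).length : Int) + 1 := by
            rw [hA]; push_cast [List.length_cons]; ring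
          rw [hLval]
          by_cases hb : r - 1 ≤ ((headL skip 97).length : Int)
          · rw [if_pos hb]
            rw [PySem.Int.mod_eq_emod_of_pos (by omega)]
            rw [Int.emod_eq_of_lt (by omega) (by omega)]
            rw [hA]
            rw [PySem.List.pyGetD_of_nonneg _ _ (by omega : (0:Int) ≤ r - 1),
                PySem.List.pyGetD_of_nonneg _ _ (by omega : (0:Int) ≤ r - 1 - 1)]
            rw [show (r - 1).toNat = (r - 1 - 1).toNat + 1 from by omega]
            simp [List.getD_cons_succ]
          · rw [if_neg hb]
            congr 1
            rw [PySem.Int.mod_eq_emod_of_pos (by omega),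
                PySem.Int.mod_eq_emod_of_pos (by omega)]
            rw [show r - 1 - ((headL skip 97).length : Int) - 1
                  = (r - 1) - (((headL skip 97).length : Int) + 1) from by ring]
            rw [Int.sub_emod_right]
      · simp only [Bool.not_eq_true] at hok
        rw [if_neg (by simp [hok])]
        have hA : allowedL skip = headL skip 97 := by rw [hAeq, if_neg (by simp [hok])]
        have hne : headL skip 97 ≠ [] := by
          intro hcontra; rw [hA, hcontra] at hL; simp at hL
        have hdist : distP skip p = distP skip 97 + 1 := distP_wrap_not skip p hp2 hok hne
        have hfuel : 150 * (r.toNat - 1) + distP skip 97 ≤ f := by omega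
        rw [ih 97 r (by omega) (by omega) hr (Or.inr hL) hfuel]
        unfold Bval
        have hLval : ((allowedL skip).length : Int) = ((headL skip 97).length : Int) := by rw [hA]
        by_cases hb : r ≤ ((headL skip 97).length : Int)
        · rw [if_pos hb]
          rw [PySem.Int.mod_eq_emod_of_pos (by omega)]
          rw [Int.emod_eq_of_lt (by omega) (by omega)]
          rw [hA]
        · rw [if_neg hb]
          rw [hA]
          congr 1
          rw [PySem.Int.mod_eq_emod_of_pos (by omega),
              PySem.Int.mod_eq_emod_of_pos (by omega)]
          rw [show r - ((headL skip 97).length : Int) - 1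
                = (r - 1) - ((headL skip 97).length : Int) from by ring]
          rw [Int.sub_emod_right]

theorem altChar_eq (skip : String) (index : Int) (c : Char) :
    altChar (PySem.Set.ofList skip.toList)
        ((PySem.List.pyRange 97 123 1).filter
          (fun q => !(PySem.Set.contains (PySem.Set.ofList skip.toList) (pyChr q))))
        index c
      = if index ≤ 0 then c else pyChr (Bval skip ((c.toNat : Int)) index) := by
  have hpred : (fun q => !(PySem.Set.contains (PySem.Set.ofList skip.toList) (pyChr q)))
      = okq skip := by
    funext q; rw [okq, contains_ofList_char]
  have hall : (PySem.List.pyRange 97 123 1).filter (okq skip) = allowedL skip := by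
    unfold allowedL headL; norm_num
  unfold altChar Bval
  rw [hpred, hall]
  by_cases h0 : index ≤ 0
  · simp [h0]
  · rw [if_neg h0, if_neg h0]
    rw [apply_ite pyChr]
    rfl

-- ===== VERDICT (by name: the statement is the Claim_ definition above) =====
theorem solution_spec : Claim_equal_solution := by
  intro s skip index hdom hpre
  unfold Spec_solution solution solution_alt
  rw [PySem.List.foldl_append_singleton_eq_map]
  congr 1
  apply List.map_congr_left
  intro c hc
  have hdomc : pvDomChar c = true := by
    unfold Dom_solution at hdom
    simp only [pvDomStr, List.all_eq_true, Bool.and_eq_true] at hdom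
    exact hdom.1.1 c hc
  have h9 : 9 ≤ ((c.toNat : Int)) := by simp [pvDomChar] at hdomc; omega
  have h126 : ((c.toNat : Int)) ≤ 126 := by simp [pvDomChar] at hdomc; omega
  rw [solGo_eq_loopRem, altChar_eq]
  by_cases hidx : index ≤ 0
  · rw [if_pos hidx, loopRem_zero skip _ _ _ (by omega)]
    simp [pyChr, Char.ofNat_toNat]
  · rw [if_neg hidx, show index - 0 = index from by ring]
    have hside : (index ≤ ((headL skip ((c.toNat : Int))).length : Int)
        ∨ 1 ≤ (allowedL skip).length) := by
      rcases hpre with h | h | h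
      · omega
      · right; exact h
      · left; exact h c hc
    have hdle : distP skip ((c.toNat : Int)) ≤ 140 := dist_le skip _ h9
    congr 1
    exact main_lemma skip (150 * index.toNat + 200) ((c.toNat : Int)) index h9 h126
      (by omega) hside (by omega)
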